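-- pv_equiv track=rewrite | github.com/my-lambda-projects/Lambda | WEEKS/wk18/code_signal/cs-weeks3-4-projects.py | alphabeticShift
-- ===== SOURCE A (Python) =====
-- def alphabeticShift(inputString):
--     new_string = ""
--     for letter in inputString:
--         new_letter = ord(letter) + 1
--         if new_letter == 123:
--             new_letter = 97
--         new_string += chr(new_letter)
--     return new_string
-- ===== SOURCE B (Python) =====
-- def alphabeticShift(inputString):
--     table = {}
--     for c in inputString:
--         o = ord(c)
--         table[o] = 97 if o == 122 else o + 1
--     return inputString.translate(table)
-- ===== Notes on version B (the rewrite author's own statement) =====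
-- stated objective: idiomatic
-- what changed: B first builds a translation table mapping each code point of the input to its shifted code point (wrap expressed as o==122 -> 97), then delegates the output pass to str.translate, instead of A's per-character string accumulation with the +1-then-check-123 branch.
import Mathlib
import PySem

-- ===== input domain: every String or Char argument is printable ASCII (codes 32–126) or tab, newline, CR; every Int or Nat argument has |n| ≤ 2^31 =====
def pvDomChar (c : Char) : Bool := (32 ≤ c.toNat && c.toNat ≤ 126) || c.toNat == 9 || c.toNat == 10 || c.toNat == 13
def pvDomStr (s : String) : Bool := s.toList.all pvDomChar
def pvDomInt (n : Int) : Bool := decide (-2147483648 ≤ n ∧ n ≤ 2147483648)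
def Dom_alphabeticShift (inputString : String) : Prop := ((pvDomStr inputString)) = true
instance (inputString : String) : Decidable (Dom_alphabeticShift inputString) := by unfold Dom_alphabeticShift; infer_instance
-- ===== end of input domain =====

-- B builds a translation table (code point -> shifted code point) in one pass and then
-- delegates the output pass to a translate-style lookup map, instead of A's per-character
-- accumulation with the +1-then-check-123 branch.  Objective: idiomatic.

-- ===== PORT A =====
-- A: accumulate the output char by char: new_letter = ord(letter)+1, wrap 123 -> 97, append.
def alphabeticShift (inputString : String) : String :=
  String.mk (inputString.toList.foldl (fun new_string letter =>
    let new_letter := letter.toNat + 1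
    let new_letter := if new_letter = 123 then 97 else new_letter
    new_string ++ [Char.ofNat new_letter]) [])

-- ===== PORT B =====
-- B: build the translation table by one pass over the input, then translate:
-- each char is looked up in the table; an unmapped char stays unchanged (str.translate rule).
def alphabeticShift_alt (inputString : String) : String :=
  let table := inputString.toList.foldl
    (fun d c => d.insert c.toNat (if c.toNat = 122 then 97 else c.toNat + 1))
    (PySem.Dict.empty : PySem.Dict Nat Nat)
  String.mk (inputString.toList.map (fun c =>
    match table.get? c.toNat with
    | some v => Char.ofNat v
    | none => c))

-- ===== PRECONDITION & SPEC =====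
def Spec_alphabeticShift (inputString : String) (out : String) : Prop := out = alphabeticShift_alt inputString
instance (inputString : String) (out : String) : Decidable (Spec_alphabeticShift inputString out) := by unfold Spec_alphabeticShift; infer_instance

-- ===== CLAIM (what is proved, stated in full; the proofs are below) =====
def Claim_equal_alphabeticShift : Prop := ∀ (inputString : String), Dom_alphabeticShift inputString → Spec_alphabeticShift inputString (alphabeticShift inputString)

-- ===== LEMMAS AND PROOFS =====

-- the shift function both ports compute per code point
def pvShift (o : Nat) : Nat := if o = 122 then 97 else o + 1

-- inserting only pairs (k, pvShift k) preserves "get? k = some (pvShift k)"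
theorem pv_fold_preserves (l : List Char) (d : PySem.Dict Nat Nat) (k : Nat)
    (h : d.get? k = some (pvShift k)) :
    (l.foldl (fun d c => d.insert c.toNat (if c.toNat = 122 then 97 else c.toNat + 1)) d).get? k
      = some (pvShift k) := by
  induction l generalizing d with
  | nil => exact h
  | cons a tl ih =>
    apply ih
    rw [PySem.Dict.get?_insert]
    by_cases hk : k = a.toNat
    · simp [hk, pvShift]
    · simp [hk, h]

-- after folding the inserts over l, every key coming from a char of l maps to its shift
theorem pv_fold_mem (l : List Char) (d : PySem.Dict Nat Nat) (c : Char) (hc : c ∈ l) :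
    (l.foldl (fun d c => d.insert c.toNat (if c.toNat = 122 then 97 else c.toNat + 1)) d).get? c.toNat
      = some (pvShift c.toNat) := by
  induction l generalizing d with
  | nil => cases hc
  | cons a tl ih =>
    rw [List.foldl_cons]
    rcases List.mem_cons.mp hc with h | h
    · subst h
      by_cases hm : c ∈ tl
      · exact ih _ hm
      · apply pv_fold_preserves
        rw [PySem.Dict.get?_insert_self]
        rfl
    · exact ih _ h

-- A's accumulation fold is the map of the per-char shift
theorem pv_A_fold (l : List Char) (acc : List Char) :
    (l.foldl (fun new_string letter =>
        let new_letter := letter.toNat + 1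
        let new_letter := if new_letter = 123 then 97 else new_letter
        new_string ++ [Char.ofNat new_letter]) acc)
      = acc ++ l.map (fun c => Char.ofNat (pvShift c.toNat)) := by
  induction l generalizing acc with
  | nil => simp
  | cons a tl ih =>
    simp only [List.foldl_cons, List.map_cons, ih]
    have h2 : (if a.toNat + 1 = 123 then 97 else a.toNat + 1) = pvShift a.toNat := by
      unfold pvShift; split_ifs <;> omega
    rw [h2]; simp

-- ===== VERDICT (by name: the statement is the Claim_ definition above) =====
theorem alphabeticShift_spec : Claim_equal_alphabeticShift := by
  intro s _
  unfold Spec_alphabeticShift alphabeticShift alphabeticShift_alt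
  rw [pv_A_fold]
  simp only [List.nil_append]
  congr 1
  apply List.map_congr_left
  intro c hc
  rw [pv_fold_mem _ _ _ hc]
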